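-- pv_equiv track=rewrite | github.com/inaciovasquez2020/chronos-urf-rr | toolkit/oblivion/scripts/cfi_pair_generator.py | cfi_pair_on_cycle
-- ===== SOURCE A (Python) =====
-- from collections import defaultdict
-- from typing import Dict, Iterable, List, Set, Tuple
--
-- Vertex = str
--
-- Graph = Dict[Vertex, Set[Vertex]]
--
-- Edge = Tuple[int, int]
--
-- def add_edge(G: Graph, u: Vertex, v: Vertex) -> None:
--     G.setdefault(u, set()).add(v)
--     G.setdefault(v, set()).add(u)
--
-- def make_base_cycle(n: int) -> List[Edge]:
--     return [(i, (i + 1) % n) for i in range(n)]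
--
-- def incident_edges(base_edges: List[Edge], v: int) -> List[Edge]:
--     out: List[Edge] = []
--     for e in base_edges:
--         if v in e:
--             out.append(e)
--     return out
--
-- def ordered_edge(e: Edge) -> Edge:
--     a, b = e
--     return (a, b) if a <= b else (b, a)
--
-- def edge_name(e: Edge) -> str:
--     a, b = ordered_edge(e)
--     return f"e{a}_{b}"
--
-- def cfi_pair_on_cycle(n: int, twisted_edges: Iterable[Edge]) -> Tuple[Graph, Graph]:
--     base_edges = [ordered_edge(e) for e in make_base_cycle(n)]
--     twisted = {ordered_edge(e) for e in twisted_edges}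
--
--     G0: Graph = defaultdict(set)
--     G1: Graph = defaultdict(set)
--
--     # edge gadgets: two endpoint copies per base edge
--     for e in base_edges:
--         en = edge_name(e)
--         for bit in (0, 1):
--             G0[f"{en}:L{bit}"]
--             G0[f"{en}:R{bit}"]
--             G1[f"{en}:L{bit}"]
--             G1[f"{en}:R{bit}"]
--
--     # vertex gadgets: parity-even assignments on incident edges
--     for v in range(n):
--         inc = [edge_name(e) for e in incident_edges(base_edges, v)]
--         deg = len(inc)
--         for mask in range(1 << deg):
--             parity = bin(mask).count("1") % 2
--             if parity != 0:
--                 continue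
--             bits = tuple((mask >> i) & 1 for i in range(deg))
--             label = "".join(str(b) for b in bits)
--             gv = f"v{v}:P{label}"
--             G0[gv]
--             G1[gv]
--             for i, en in enumerate(inc):
--                 b = bits[i]
--                 add_edge(G0, gv, f"{en}:L{b}")
--                 add_edge(G1, gv, f"{en}:L{b}")
--
--     # connect the two sides of each edge gadget
--     for e in base_edges:
--         en = edge_name(e)
--         if e in twisted:
--             add_edge(G0, f"{en}:L0", f"{en}:R0")
--             add_edge(G0, f"{en}:L1", f"{en}:R1")
--             add_edge(G1, f"{en}:L0", f"{en}:R1")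
--             add_edge(G1, f"{en}:L1", f"{en}:R0")
--         else:
--             add_edge(G0, f"{en}:L0", f"{en}:R0")
--             add_edge(G0, f"{en}:L1", f"{en}:R1")
--             add_edge(G1, f"{en}:L0", f"{en}:R0")
--             add_edge(G1, f"{en}:L1", f"{en}:R1")
--
--     return dict(G0), dict(G1)
-- ===== SOURCE B (Python) =====
-- def cfi_pair_on_cycle(n, twisted_edges):
--     # CFI pair over the n-cycle built from the cycle's structure directly: every vertex
--     # has exactly two incident edges (one loop when n == 1), known in closed form, so the
--     # even-parity vertex gadgets are exactly P00 and P11 (P0 for the loop) -- no edge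
--     # scanning and no 2^deg mask enumeration with a parity filter.
--     twisted = {(a, b) if a <= b else (b, a) for (a, b) in twisted_edges}
--
--     if n <= 0:
--         base = []
--     elif n == 1:
--         base = [(0, 0)]
--     else:
--         base = [(i, i + 1) for i in range(n - 1)] + [(0, n - 1)]
--
--     G = {}
--
--     def link(u, w):
--         G.setdefault(u, set()).add(w)
--         G.setdefault(w, set()).add(u)
--
--     # one copy of the skeleton: the four endpoint copies of each edge gadget
--     for (a, b) in base:
--         en = "e%d_%d" % (a, b)
--         for k in (en + ":L0", en + ":R0", en + ":L1", en + ":R1"):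
--             G.setdefault(k, set())
--
--     # vertex gadgets, incidence in closed form from the cycle structure
--     for v in range(n):
--         if n == 1:
--             inc = ["e0_0"]
--         elif v == 0:
--             inc = ["e0_1", "e0_%d" % (n - 1)]
--         elif v < n - 1:
--             inc = ["e%d_%d" % (v - 1, v), "e%d_%d" % (v, v + 1)]
--         else:
--             inc = ["e%d_%d" % (n - 2, n - 1), "e0_%d" % (n - 1)]
--         if len(inc) == 1:
--             gv = "v%d:P0" % v
--             G.setdefault(gv, set())
--             link(gv, inc[0] + ":L0")
--         else:
--             for b in (0, 1):
--                 gv = "v%d:P%d%d" % (v, b, b)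
--                 G.setdefault(gv, set())
--                 for en in inc:
--                     link(gv, en + ":L%d" % b)
--
--     # duplicate the skeleton, then wire the sides: straight in G0, shifted by r in G1
--     G0 = {k: set(s) for k, s in G.items()}
--     G1 = {k: set(s) for k, s in G.items()}
--
--     def link2(H, u, w):
--         H.setdefault(u, set()).add(w)
--         H.setdefault(w, set()).add(u)
--
--     for (a, b) in base:
--         en = "e%d_%d" % (a, b)
--         r = 1 if (a, b) in twisted else 0
--         for bit in (0, 1):
--             link2(G0, en + ":L%d" % bit, en + ":R%d" % bit)
--             link2(G1, en + ":L%d" % bit, en + ":R%d" % ((bit + r) % 2))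
--     return G0, G1
-- ===== Notes on version B (the rewrite author's own statement) =====
-- stated objective: faster
-- what changed: B drops A's gadget machinery entirely: instead of rescanning all edges per vertex and enumerating all 2^deg masks with a parity filter, B uses the cycle structure directly -- each vertex's two incident edges are written in closed form and its even-parity gadgets are hard-coded as P00/P11 (P0 for the n=1 loop); one skeleton graph is built, duplicated, and the edge sides wired straight (G0) vs. shifted by the twist bit (G1) instead of A's lockstep construction of both graphs.
import Mathlib
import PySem

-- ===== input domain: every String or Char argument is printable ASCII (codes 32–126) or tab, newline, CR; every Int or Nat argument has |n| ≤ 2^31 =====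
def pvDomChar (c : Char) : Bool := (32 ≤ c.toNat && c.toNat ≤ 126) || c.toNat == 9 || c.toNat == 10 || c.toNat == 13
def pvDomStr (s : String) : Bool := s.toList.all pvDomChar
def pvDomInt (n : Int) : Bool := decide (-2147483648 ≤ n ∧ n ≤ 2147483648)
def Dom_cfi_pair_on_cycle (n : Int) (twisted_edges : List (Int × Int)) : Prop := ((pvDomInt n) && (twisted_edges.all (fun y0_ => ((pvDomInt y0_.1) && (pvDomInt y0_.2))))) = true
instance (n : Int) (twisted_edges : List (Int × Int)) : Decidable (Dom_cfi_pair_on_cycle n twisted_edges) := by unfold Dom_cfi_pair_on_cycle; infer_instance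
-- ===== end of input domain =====

-- B builds the CFI pair from the cycle's structure directly: closed-form incidence per
-- vertex and hard-coded even-parity gadgets (P00/P11, P0 for the n=1 loop) instead of A's
-- per-vertex edge rescan and 2^deg mask enumeration with a parity filter; one skeleton is
-- built, duplicated and wired straight (G0) vs. shifted (G1); objective: faster (asymptotic).



-- ===== PORT A =====
-- helpers of A (ordered_edge, edge_name, incident_edges, add_edge), transliterated
abbrev pvGraph := PySem.Dict String (PySem.Set String)

def pvOrderedEdge (e : Int × Int) : Int × Int := if e.1 ≤ e.2 then e else (e.2, e.1)

def pvEdgeName (e : Int × Int) : String :=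
  let o := pvOrderedEdge e
  "e" ++ PySem.Int.toStr o.1 ++ "_" ++ PySem.Int.toStr o.2

def pvIncidentEdges (base : List (Int × Int)) (v : Int) : List (Int × Int) :=
  base.foldl (fun out e => if v == e.1 || v == e.2 then out ++ [e] else out) []

def pvAddEdge (G : pvGraph) (u v : String) : pvGraph :=
  let G := G.insert u (PySem.Set.add (G.getD u PySem.Set.empty) v)
  G.insert v (PySem.Set.add (G.getD v PySem.Set.empty) u)

-- defaultdict access G[k] (creates the key with an empty set)
def pvTouch (G : pvGraph) (k : String) : pvGraph := G.setdefault k PySem.Set.empty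

def cfi_pair_on_cycle (n : Int) (twisted_edges : List (Int × Int)) : (List (String × List String)) × (List (String × List String)) :=
  let base := (PySem.List.pyRange 0 n 1).map (fun i => pvOrderedEdge (i, PySem.Int.mod (i + 1) n))
  let twisted := PySem.Set.ofList (twisted_edges.map pvOrderedEdge)
  -- edge gadgets: two endpoint copies per base edge
  let GG := base.foldl (fun (GG : pvGraph × pvGraph) e =>
      let en := pvEdgeName e
      ([0, 1] : List Int).foldl (fun GG bit =>
        let l := en ++ ":L" ++ PySem.Int.toStr bit
        let r := en ++ ":R" ++ PySem.Int.toStr bit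
        (pvTouch (pvTouch GG.1 l) r, pvTouch (pvTouch GG.2 l) r)) GG)
    (PySem.Dict.empty, PySem.Dict.empty)
  -- vertex gadgets: parity-even assignments on incident edges
  let GG := (PySem.List.pyRange 0 n 1).foldl (fun GG v =>
      let inc := (pvIncidentEdges base v).map pvEdgeName
      let deg := inc.length
      (PySem.List.pyRange 0 ((1 : Int) <<< deg) 1).foldl (fun GG mask =>
        -- bin(mask).count("1") ported as PySem.Int.bitCount (exact for mask ≥ 0)
        let parity := PySem.Int.mod (PySem.Int.bitCount mask : Int) 2
        if parity ≠ 0 then GG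
        else
          -- (mask >> i) & 1 with 0 ≤ i (from range(deg))
          let bits := (PySem.List.pyRange 0 (deg : Int) 1).map (fun i => PySem.Int.band (mask >>> i.toNat) 1)
          let label := PySem.Str.join "" (bits.map PySem.Int.toStr)
          let gv := "v" ++ PySem.Int.toStr v ++ ":P" ++ label
          let GG := (pvTouch GG.1 gv, pvTouch GG.2 gv)
          (PySem.List.enumerate inc).foldl (fun GG p =>
            -- bits[i] with 0 ≤ i < len(bits): total form pyGetD
            let b := PySem.List.pyGetD bits p.1 0
            let tgt := p.2 ++ ":L" ++ PySem.Int.toStr b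
            (pvAddEdge GG.1 gv tgt, pvAddEdge GG.2 gv tgt)) GG) GG) GG
  -- connect the two sides of each edge gadget
  let GG := base.foldl (fun (GG : pvGraph × pvGraph) e =>
      let en := pvEdgeName e
      if twisted.contains e then
        (pvAddEdge (pvAddEdge GG.1 (en ++ ":L0") (en ++ ":R0")) (en ++ ":L1") (en ++ ":R1"),
         pvAddEdge (pvAddEdge GG.2 (en ++ ":L0") (en ++ ":R1")) (en ++ ":L1") (en ++ ":R0"))
      else
        (pvAddEdge (pvAddEdge GG.1 (en ++ ":L0") (en ++ ":R0")) (en ++ ":L1") (en ++ ":R1"),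
         pvAddEdge (pvAddEdge GG.2 (en ++ ":L0") (en ++ ":R0")) (en ++ ":L1") (en ++ ":R1"))) GG
  (GG.1.items, GG.2.items)

-- ===== PORT B =====
def pvFmt (e : Int × Int) : String := "e" ++ PySem.Int.toStr e.1 ++ "_" ++ PySem.Int.toStr e.2

def pvLink (G : pvGraph) (u w : String) : pvGraph :=
  let G := G.insert u (PySem.Set.add (G.getD u PySem.Set.empty) w)
  G.insert w (PySem.Set.add (G.getD w PySem.Set.empty) u)

def cfi_pair_on_cycle_alt (n : Int) (twisted_edges : List (Int × Int)) : (List (String × List String)) × (List (String × List String)) :=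
  let twisted := PySem.Set.ofList (twisted_edges.map (fun e => if e.1 ≤ e.2 then e else (e.2, e.1)))
  let base : List (Int × Int) :=
    if n ≤ 0 then []
    else if n = 1 then [(0, 0)]
    else (PySem.List.pyRange 0 (n - 1) 1).map (fun i => (i, i + 1)) ++ [(0, n - 1)]
  -- one copy of the skeleton: four endpoint copies per edge gadget
  let G := base.foldl (fun (G : pvGraph) e =>
      let en := pvFmt e
      [en ++ ":L0", en ++ ":R0", en ++ ":L1", en ++ ":R1"].foldl
        (fun G k => G.setdefault k PySem.Set.empty) G)
    (PySem.Dict.empty : pvGraph)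
  -- vertex gadgets, incidence in closed form from the cycle structure
  let G := (PySem.List.pyRange 0 n 1).foldl (fun G v =>
      let inc : List String :=
        if n = 1 then ["e0_0"]
        else if v = 0 then ["e0_1", "e0_" ++ PySem.Int.toStr (n - 1)]
        else if v < n - 1 then
          ["e" ++ PySem.Int.toStr (v - 1) ++ "_" ++ PySem.Int.toStr v,
           "e" ++ PySem.Int.toStr v ++ "_" ++ PySem.Int.toStr (v + 1)]
        else
          ["e" ++ PySem.Int.toStr (n - 2) ++ "_" ++ PySem.Int.toStr (n - 1),
           "e0_" ++ PySem.Int.toStr (n - 1)]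
      if inc.length = 1 then
        let gv := "v" ++ PySem.Int.toStr v ++ ":P0"
        -- inc[0]: index 0 of a nonempty list, total form pyGetD
        pvLink (G.setdefault gv PySem.Set.empty) gv (PySem.List.pyGetD inc 0 "" ++ ":L0")
      else
        ([0, 1] : List Int).foldl (fun G b =>
          let gv := "v" ++ PySem.Int.toStr v ++ ":P" ++ PySem.Int.toStr b ++ PySem.Int.toStr b
          inc.foldl (fun G en => pvLink G gv (en ++ ":L" ++ PySem.Int.toStr b))
            (G.setdefault gv PySem.Set.empty)) G) G
  -- duplicate skeleton, then wire: straight in G0, shifted by r in G1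
  let G0 := G.items.foldl (fun (d : pvGraph) p => d.insert p.1 (PySem.Set.ofList p.2)) PySem.Dict.empty
  let G1 := G.items.foldl (fun (d : pvGraph) p => d.insert p.1 (PySem.Set.ofList p.2)) PySem.Dict.empty
  let GG := base.foldl (fun (GG : pvGraph × pvGraph) e =>
      let en := pvFmt e
      let r : Int := if twisted.contains e then 1 else 0
      ([0, 1] : List Int).foldl (fun GG bit =>
        (pvLink GG.1 (en ++ ":L" ++ PySem.Int.toStr bit) (en ++ ":R" ++ PySem.Int.toStr bit),
         pvLink GG.2 (en ++ ":L" ++ PySem.Int.toStr bit)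
                     (en ++ ":R" ++ PySem.Int.toStr (PySem.Int.mod (bit + r) 2)))) GG) (G0, G1)
  (GG.1.items, GG.2.items)

-- ===== PRECONDITION & SPEC =====
def Spec_cfi_pair_on_cycle (n : Int) (twisted_edges : List (Int × Int)) (out : (List (String × List String)) × (List (String × List String))) : Prop := out = cfi_pair_on_cycle_alt n twisted_edges
instance (n : Int) (twisted_edges : List (Int × Int)) (out : (List (String × List String)) × (List (String × List String))) : Decidable (Spec_cfi_pair_on_cycle n twisted_edges out) := by unfold Spec_cfi_pair_on_cycle; infer_instance

-- ===== CLAIM (what is proved, stated in full; the proofs are below) =====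
def Claim_equal_cfi_pair_on_cycle : Prop := ∀ (n : Int) (twisted_edges : List (Int × Int)), Dom_cfi_pair_on_cycle n twisted_edges → Spec_cfi_pair_on_cycle n twisted_edges (cfi_pair_on_cycle n twisted_edges)

-- ===== LEMMAS AND PROOFS =====

-- generic fold lemmas ---------------------------------------------------------

theorem pvFoldlPair {α δ₁ δ₂ : Type} (st : δ₁ × δ₂ → α → δ₁ × δ₂)
    (f : δ₁ → α → δ₁) (g : δ₂ → α → δ₂)
    (hst : ∀ (x : δ₁) (y : δ₂) (a : α), st (x, y) a = (f x a, g y a)) :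
    ∀ (l : List α) (x : δ₁) (y : δ₂), l.foldl st (x, y) = (l.foldl f x, l.foldl g y) := by
  intro l
  induction l with
  | nil => intro x y; rfl
  | cons a t ih => intro x y; rw [List.foldl_cons, hst, ih, List.foldl_cons, List.foldl_cons]

theorem pvFoldlInv {α δ : Type} (P : δ → Prop) (f : δ → α → δ)
    (h : ∀ d a, P d → P (f d a)) : ∀ (l : List α) (d : δ), P d → P (l.foldl f d) := by
  intro l
  induction l with
  | nil => intro d hd; exact hd
  | cons a t ih => intro d hd; exact ih _ (h d a hd)

-- the base cycle --------------------------------------------------------------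

def pvBaseB (n : Int) : List (Int × Int) :=
  if n ≤ 0 then []
  else if n = 1 then [(0, 0)]
  else (PySem.List.pyRange 0 (n - 1) 1).map (fun i => (i, i + 1)) ++ [(0, n - 1)]

theorem pvBase_eq (n : Int) :
    (PySem.List.pyRange 0 n 1).map (fun i => pvOrderedEdge (i, PySem.Int.mod (i + 1) n)) = pvBaseB n := by
  unfold pvBaseB
  split_ifs with h1 h2
  · have : PySem.List.pyRange 0 n 1 = [] := by
      apply List.eq_nil_iff_forall_not_mem.mpr
      intro x hx
      have := PySem.List.mem_pyRange_one.mp hx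
      omega
    simp [this]
  · subst h2; decide
  · have h2' : (2:Int) ≤ n := by omega
    have hsplit : PySem.List.pyRange 0 n 1 = PySem.List.pyRange 0 (n - 1) 1 ++ [n - 1] := by
      have := PySem.List.pyRange_one_succ_right (a := 0) (b := n - 1) (by omega)
      simpa [sub_add_cancel] using this
    rw [hsplit, List.map_append]
    congr 1
    · apply List.map_congr_left
      intro i hi
      have hi' := PySem.List.mem_pyRange_one.mp hi
      have hm : PySem.Int.mod (i + 1) n = i + 1 := by
        rw [PySem.Int.mod_eq_emod_of_pos (by omega)]
        exact Int.emod_eq_of_lt (by omega) (by omega)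
      simp [pvOrderedEdge, hm]
    · have hm : PySem.Int.mod n n = 0 := by
        rw [PySem.Int.mod_eq_emod_of_pos (by omega)]
        simp
      have : n - 1 + 1 = n := by ring
      simp [pvOrderedEdge, this, hm]
      omega

theorem pvBase_ordered (n : Int) : ∀ e ∈ pvBaseB n, e.1 ≤ e.2 := by
  intro e he
  unfold pvBaseB at he
  split_ifs at he with h1 h2
  · simp at he
  · simp at he; simp [he]
  · rcases List.mem_append.mp he with h | h
    · rcases List.mem_map.mp h with ⟨i, _, rfl⟩; simp
    · simp at h; simp [h]; omega

theorem pvName_eq (e : Int × Int) (h : e.1 ≤ e.2) : pvEdgeName e = pvFmt e := by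
  simp [pvEdgeName, pvFmt, pvOrderedEdge, h]

-- incidence: A's rescan characterised as a filter, then computed in closed form
-- for the cycle's base edges ---------------------------------------------------

theorem pvIncident_filter (base : List (Int × Int)) (v : Int) :
    pvIncidentEdges base v = base.filter (fun e => v == e.1 || v == e.2) := by
  unfold pvIncidentEdges
  rw [PySem.List.foldl_append_if_eq_filter]
  exact List.nil_append _

def pvIncPairs (n v : Int) : List (Int × Int) :=
  if n = 1 then [(0, 0)]
  else if v = 0 then [(0, 1), (0, n - 1)]
  else if v < n - 1 then [(v - 1, v), (v, v + 1)]
  else [(n - 2, n - 1), (0, n - 1)]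

theorem pvRangeFilter_one (m j : Int) (q : Int → Bool) (h0 : 0 ≤ j) (hj : j < m)
    (h : ∀ i, 0 ≤ i → i < m → (q i = true ↔ i = j)) :
    (PySem.List.pyRange 0 m 1).filter q = [j] := by
  have hsplit : PySem.List.pyRange 0 m 1
      = PySem.List.pyRange 0 j 1 ++ [j] ++ PySem.List.pyRange (j + 1) m 1 := by
    rw [← PySem.List.pyRange_one_singleton (a := j)]
    rw [← PySem.List.pyRange_one_append 0 j (j + 1) h0 (by omega),
      ← PySem.List.pyRange_one_append 0 (j + 1) m (by omega) (by omega)]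
  rw [hsplit, List.filter_append, List.filter_append]
  have hqj : q j = true := (h j h0 hj).mpr rfl
  have hl : (PySem.List.pyRange 0 j 1).filter q = [] := by
    rw [List.filter_eq_nil_iff]
    intro i hi
    have hi' := PySem.List.mem_pyRange_one.mp hi
    have := h i hi'.1 (by omega)
    simp only [Bool.not_eq_true]
    rcases Bool.eq_false_or_eq_true (q i) with ht | hf
    · exact absurd (this.mp ht) (by omega)
    · exact hf
  have hr : (PySem.List.pyRange (j + 1) m 1).filter q = [] := by
    rw [List.filter_eq_nil_iff]
    intro i hi
    have hi' := PySem.List.mem_pyRange_one.mp hi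
    have := h i (by omega) hi'.2
    simp only [Bool.not_eq_true]
    rcases Bool.eq_false_or_eq_true (q i) with ht | hf
    · exact absurd (this.mp ht) (by omega)
    · exact hf
  simp [hl, hr, hqj]

theorem pvRangeFilter_two (m j k : Int) (q : Int → Bool) (h0 : 0 ≤ j) (hjk : j < k)
    (hk : k < m) (h : ∀ i, 0 ≤ i → i < m → (q i = true ↔ (i = j ∨ i = k))) :
    (PySem.List.pyRange 0 m 1).filter q = [j, k] := by
  have hsplit : PySem.List.pyRange 0 m 1
      = PySem.List.pyRange 0 k 1 ++ [k] ++ PySem.List.pyRange (k + 1) m 1 := by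
    rw [← PySem.List.pyRange_one_singleton (a := k)]
    rw [← PySem.List.pyRange_one_append 0 k (k + 1) (by omega) (by omega),
      ← PySem.List.pyRange_one_append 0 (k + 1) m (by omega) (by omega)]
  rw [hsplit, List.filter_append, List.filter_append]
  have hqk : q k = true := (h k (by omega) hk).mpr (Or.inr rfl)
  have hl : (PySem.List.pyRange 0 k 1).filter q = [j] := by
    apply pvRangeFilter_one k j q h0 hjk
    intro i hi hik
    rw [h i hi (by omega)]
    omega
  have hr : (PySem.List.pyRange (k + 1) m 1).filter q = [] := by
    rw [List.filter_eq_nil_iff]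
    intro i hi
    have hi' := PySem.List.mem_pyRange_one.mp hi
    have := h i (by omega) hi'.2
    simp only [Bool.not_eq_true]
    rcases Bool.eq_false_or_eq_true (q i) with ht | hf
    · exact absurd (this.mp ht) (by omega)
    · exact hf
  simp [hl, hr, hqk]

theorem pvInc_closed (n v : Int) (hv0 : 0 ≤ v) (hvn : v < n) :
    pvIncidentEdges (pvBaseB n) v = pvIncPairs n v := by
  rw [pvIncident_filter]
  unfold pvBaseB pvIncPairs
  by_cases h1 : n = 1
  · subst h1
    have hv : v = 0 := by omega
    subst hv
    decide
  · have h2 : 2 ≤ n := by omega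
    rw [if_neg (by omega), if_neg h1, if_neg h1, List.filter_append]
    have hmapfilter :
        ((PySem.List.pyRange 0 (n - 1) 1).map (fun i => (i, i + 1))).filter
            (fun e => v == e.1 || v == e.2)
          = ((PySem.List.pyRange 0 (n - 1) 1).filter (fun i => v == i || v == i + 1)).map
            (fun i => (i, i + 1)) := by
      rw [List.filter_map]
      rfl
    rw [hmapfilter]
    by_cases hz : v = 0
    · subst hz
      rw [if_pos rfl]
      have : (PySem.List.pyRange 0 (n - 1) 1).filter (fun i => (0 : Int) == i || (0 : Int) == i + 1)
          = [0] := by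
        apply pvRangeFilter_one (n - 1) 0 _ le_rfl (by omega)
        intro i hi him
        simp only [beq_iff_eq, Bool.or_eq_true]
        omega
      simp [this]
      first | omega | rfl | skip
    · rw [if_neg hz]
      by_cases hlast : v < n - 1
      · rw [if_pos hlast]
        have : (PySem.List.pyRange 0 (n - 1) 1).filter (fun i => v == i || v == i + 1)
            = [v - 1, v] := by
          apply pvRangeFilter_two (n - 1) (v - 1) v _ (by omega) (by omega) (by omega)
          intro i hi him
          simp only [beq_iff_eq, Bool.or_eq_true]
          omega
        simp [this]
        first | (constructor <;> omega) | omega | rfl | skip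
      · rw [if_neg hlast]
        have hvlast : v = n - 1 := by omega
        subst hvlast
        have : (PySem.List.pyRange 0 (n - 1) 1).filter (fun i => (n - 1) == i || (n - 1) == i + 1)
            = [n - 2] := by
          apply pvRangeFilter_one (n - 1) (n - 2) _ (by omega) (by omega)
          intro i hi him
          simp only [beq_iff_eq, Bool.or_eq_true]
          omega
        simp [this]
        first | (refine ⟨⟨?_, ?_⟩, ?_⟩ <;> omega) | omega | rfl | skip

-- string-literal concatenations -----------------------------------------------

theorem pvCatL0 (s : String) : s ++ ":L" ++ PySem.Int.toStr 0 = s ++ ":L0" := by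
  rw [show PySem.Int.toStr 0 = "0" from by decide, String.append_assoc,
    show (":L" ++ "0" : String) = ":L0" from by decide]

theorem pvCatL1 (s : String) : s ++ ":L" ++ PySem.Int.toStr 1 = s ++ ":L1" := by
  rw [show PySem.Int.toStr 1 = "1" from by decide, String.append_assoc,
    show (":L" ++ "1" : String) = ":L1" from by decide]

theorem pvCatR0 (s : String) : s ++ ":R" ++ PySem.Int.toStr 0 = s ++ ":R0" := by
  rw [show PySem.Int.toStr 0 = "0" from by decide, String.append_assoc,
    show (":R" ++ "0" : String) = ":R0" from by decide]

theorem pvCatR1 (s : String) : s ++ ":R" ++ PySem.Int.toStr 1 = s ++ ":R1" := by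
  rw [show PySem.Int.toStr 1 = "1" from by decide, String.append_assoc,
    show (":R" ++ "1" : String) = ":R1" from by decide]

-- dict well-formedness and the copy step --------------------------------------

def pvGood (G : pvGraph) : Prop := G.keys.Nodup ∧ ∀ p ∈ G.items, p.2.Nodup

theorem pvOfList_self {s : List String} (h : s.Nodup) : PySem.Set.ofList s = s := by
  have aux : ∀ (s acc : List String), s.Nodup → (∀ x ∈ s, x ∉ acc) →
      s.foldl PySem.Set.add acc = acc ++ s := by
    intro s
    induction s with
    | nil => intro acc _ _; simp
    | cons x t ih =>
      intro acc hnd hdis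
      have hx : x ∉ acc := hdis x List.mem_cons_self
      have hadd : PySem.Set.add acc x = acc ++ [x] := by
        simp [PySem.Set.add, hx]
      rw [List.foldl_cons, hadd, ih (acc ++ [x]) hnd.of_cons]
      · simp
      · intro y hy
        simp only [List.mem_append, List.mem_singleton]
        rintro (hy' | rfl)
        · exact hdis y (List.mem_cons_of_mem _ hy) hy'
        · exact (List.nodup_cons.mp hnd).1 hy
  rw [PySem.Set.ofList_eq_foldl, aux s [] h (by simp), List.nil_append]

theorem pvGood_getD {G : pvGraph} (h : pvGood G) (k : String) : (G.getD k PySem.Set.empty).Nodup := by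
  rw [PySem.Dict.getD_eq_get?_getD]
  cases hq : G.get? k with
  | none => simp [PySem.Set.empty]
  | some v =>
    have hm := PySem.Dict.mem_items_of_get?_eq_some G hq
    simpa using h.2 _ hm

theorem pvGood_insert {G : pvGraph} (h : pvGood G) {k : String} {s : PySem.Set String}
    (hs : s.Nodup) : pvGood (G.insert k s) := by
  refine ⟨PySem.Dict.nodup_keys_insert _ _ _ h.1, ?_⟩
  intro p hp
  rcases (PySem.Dict.mem_items_insert _ _ _ _).mp hp with rfl | ⟨hmem, _⟩
  · exact hs
  · exact h.2 p hmem

theorem pvGood_touch {G : pvGraph} (h : pvGood G) (k : String) : pvGood (pvTouch G k) := by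
  unfold pvTouch PySem.Dict.setdefault
  by_cases hc : G.contains k = true
  · simpa [hc] using h
  · rw [if_neg hc]
    constructor
    · have hk : k ∉ G.keys := fun hm => hc ((PySem.Dict.contains_iff_mem_keys G k).mpr hm)
      have : (PySem.Dict.mk (G.items ++ [(k, PySem.Set.empty)]) : pvGraph).keys
          = G.keys ++ [k] := by
        simp [PySem.Dict.keys]
      rw [this]
      simpa [List.nodup_append] using ⟨h.1, fun a ha hak => hk (hak ▸ ha)⟩
    · intro p hp
      rcases List.mem_append.mp hp with hp' | hp'
      · exact h.2 p hp'
      · simp at hp'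
        simp [hp']

theorem pvGood_link {G : pvGraph} (h : pvGood G) (u w : String) : pvGood (pvLink G u w) := by
  unfold pvLink
  have h1 : pvGood (G.insert u (PySem.Set.add (G.getD u PySem.Set.empty) w)) :=
    pvGood_insert h (PySem.Set.nodup_add _ _ (pvGood_getD h u))
  exact pvGood_insert h1 (PySem.Set.nodup_add _ _ (pvGood_getD h1 w))

theorem pvCopy_eq {G : pvGraph} (h : pvGood G) :
    G.items.foldl (fun (d : pvGraph) p => d.insert p.1 (PySem.Set.ofList p.2)) PySem.Dict.empty = G := by
  have hfresh : ∀ p ∈ G.items, (PySem.Dict.empty : pvGraph).contains p.1 = false := by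
    intro p _
    simp [PySem.Dict.contains_empty]
  have hnd : (G.items.map (fun p => p.1)).Nodup := by
    have := h.1
    simpa [PySem.Dict.keys] using this
  apply PySem.Dict.ext
  rw [PySem.Dict.items_foldl_insert_fresh G.items (fun p => p.1) (fun p => PySem.Set.ofList p.2)
    PySem.Dict.empty hfresh hnd]
  have : ∀ p ∈ G.items, (p.1, PySem.Set.ofList p.2) = p := by
    intro p hp
    rw [pvOfList_self (h.2 p hp)]
  rw [List.map_congr_left this]
  simp [PySem.Dict.empty]

-- named copies of the two ports' loop bodies (definitionally equal to the ports) --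

def pvABase (n : Int) : List (Int × Int) :=
  (PySem.List.pyRange 0 n 1).map (fun i => pvOrderedEdge (i, PySem.Int.mod (i + 1) n))

def pvTw (te : List (Int × Int)) : PySem.Set (Int × Int) :=
  PySem.Set.ofList (te.map (fun e => if e.1 ≤ e.2 then e else (e.2, e.1)))

def pvA1step : pvGraph × pvGraph → (Int × Int) → pvGraph × pvGraph := fun GG e =>
  let en := pvEdgeName e
  ([0, 1] : List Int).foldl (fun GG bit =>
    let l := en ++ ":L" ++ PySem.Int.toStr bit
    let r := en ++ ":R" ++ PySem.Int.toStr bit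
    (pvTouch (pvTouch GG.1 l) r, pvTouch (pvTouch GG.2 l) r)) GG

def pvA2step (base : List (Int × Int)) : pvGraph × pvGraph → Int → pvGraph × pvGraph := fun GG v =>
  let inc := (pvIncidentEdges base v).map pvEdgeName
  let deg := inc.length
  (PySem.List.pyRange 0 ((1 : Int) <<< deg) 1).foldl (fun GG mask =>
    let parity := PySem.Int.mod (PySem.Int.bitCount mask : Int) 2
    if parity ≠ 0 then GG
    else
      let bits := (PySem.List.pyRange 0 (deg : Int) 1).map (fun i => PySem.Int.band (mask >>> i.toNat) 1)
      let label := PySem.Str.join "" (bits.map PySem.Int.toStr)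
      let gv := "v" ++ PySem.Int.toStr v ++ ":P" ++ label
      let GG := (pvTouch GG.1 gv, pvTouch GG.2 gv)
      (PySem.List.enumerate inc).foldl (fun GG p =>
        let b := PySem.List.pyGetD bits p.1 0
        let tgt := p.2 ++ ":L" ++ PySem.Int.toStr b
        (pvAddEdge GG.1 gv tgt, pvAddEdge GG.2 gv tgt)) GG) GG

def pvA3step (twisted : PySem.Set (Int × Int)) :
    pvGraph × pvGraph → (Int × Int) → pvGraph × pvGraph := fun GG e =>
  let en := pvEdgeName e
  if twisted.contains e then
    (pvAddEdge (pvAddEdge GG.1 (en ++ ":L0") (en ++ ":R0")) (en ++ ":L1") (en ++ ":R1"),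
     pvAddEdge (pvAddEdge GG.2 (en ++ ":L0") (en ++ ":R1")) (en ++ ":L1") (en ++ ":R0"))
  else
    (pvAddEdge (pvAddEdge GG.1 (en ++ ":L0") (en ++ ":R0")) (en ++ ":L1") (en ++ ":R1"),
     pvAddEdge (pvAddEdge GG.2 (en ++ ":L0") (en ++ ":R0")) (en ++ ":L1") (en ++ ":R1"))

def pvAssemblyA (n : Int) (base : List (Int × Int)) (tw : PySem.Set (Int × Int)) :
    (List (String × List String)) × (List (String × List String)) :=
  let GG := base.foldl pvA1step (PySem.Dict.empty, PySem.Dict.empty)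
  let GG := (PySem.List.pyRange 0 n 1).foldl (pvA2step base) GG
  let GG := base.foldl (pvA3step tw) GG
  (GG.1.items, GG.2.items)

def pvP1step : pvGraph → (Int × Int) → pvGraph := fun G e =>
  let en := pvFmt e
  [en ++ ":L0", en ++ ":R0", en ++ ":L1", en ++ ":R1"].foldl
    (fun G k => G.setdefault k PySem.Set.empty) G

def pvP1 (base : List (Int × Int)) : pvGraph := base.foldl pvP1step PySem.Dict.empty

def pvQ2step (n : Int) : pvGraph → Int → pvGraph := fun G v =>
  let inc : List String :=
    if n = 1 then ["e0_0"]
    else if v = 0 then ["e0_1", "e0_" ++ PySem.Int.toStr (n - 1)]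
    else if v < n - 1 then
      ["e" ++ PySem.Int.toStr (v - 1) ++ "_" ++ PySem.Int.toStr v,
       "e" ++ PySem.Int.toStr v ++ "_" ++ PySem.Int.toStr (v + 1)]
    else
      ["e" ++ PySem.Int.toStr (n - 2) ++ "_" ++ PySem.Int.toStr (n - 1),
       "e0_" ++ PySem.Int.toStr (n - 1)]
  if inc.length = 1 then
    let gv := "v" ++ PySem.Int.toStr v ++ ":P0"
    pvLink (G.setdefault gv PySem.Set.empty) gv (PySem.List.pyGetD inc 0 "" ++ ":L0")
  else
    ([0, 1] : List Int).foldl (fun G b =>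
      let gv := "v" ++ PySem.Int.toStr v ++ ":P" ++ PySem.Int.toStr b ++ PySem.Int.toStr b
      inc.foldl (fun G en => pvLink G gv (en ++ ":L" ++ PySem.Int.toStr b))
        (G.setdefault gv PySem.Set.empty)) G

def pvQ2 (n : Int) (G : pvGraph) : pvGraph :=
  (PySem.List.pyRange 0 n 1).foldl (pvQ2step n) G

def pvCopy (G : pvGraph) : pvGraph :=
  G.items.foldl (fun (d : pvGraph) p => d.insert p.1 (PySem.Set.ofList p.2)) PySem.Dict.empty

def pvP3step (twisted : PySem.Set (Int × Int)) :
    pvGraph × pvGraph → (Int × Int) → pvGraph × pvGraph := fun GG e =>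
  let en := pvFmt e
  let r : Int := if twisted.contains e then 1 else 0
  ([0, 1] : List Int).foldl (fun GG bit =>
    (pvLink GG.1 (en ++ ":L" ++ PySem.Int.toStr bit) (en ++ ":R" ++ PySem.Int.toStr bit),
     pvLink GG.2 (en ++ ":L" ++ PySem.Int.toStr bit)
                 (en ++ ":R" ++ PySem.Int.toStr (PySem.Int.mod (bit + r) 2)))) GG

def pvAssemblyB (n : Int) (base : List (Int × Int)) (tw : PySem.Set (Int × Int)) :
    (List (String × List String)) × (List (String × List String)) :=
  let G := pvQ2 n (pvP1 base)
  let GG := base.foldl (pvP3step tw) (pvCopy G, pvCopy G)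
  (GG.1.items, GG.2.items)

theorem pvAssemblyA_spec (n : Int) (te : List (Int × Int)) :
    cfi_pair_on_cycle n te = pvAssemblyA n (pvABase n) (pvTw te) := rfl

theorem pvAssemblyB_spec (n : Int) (te : List (Int × Int)) :
    cfi_pair_on_cycle_alt n te = pvAssemblyB n (pvBaseB n) (pvTw te) := rfl

theorem pvABase_eq_baseB (n : Int) : pvABase n = pvBaseB n := pvBase_eq n

theorem pvCopyId {G : pvGraph} (h : pvGood G) : pvCopy G = G := pvCopy_eq h

-- single-graph forms of A's pair steps ----------------------------------------

def pvA1x : pvGraph → (Int × Int) → pvGraph := fun G e =>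
  let en := pvEdgeName e
  pvTouch (pvTouch (pvTouch (pvTouch G (en ++ ":L" ++ PySem.Int.toStr 0))
    (en ++ ":R" ++ PySem.Int.toStr 0)) (en ++ ":L" ++ PySem.Int.toStr 1))
    (en ++ ":R" ++ PySem.Int.toStr 1)

def pvA2mask (inc : List String) (v : Int) : pvGraph → Int → pvGraph := fun G mask =>
  if PySem.Int.mod (PySem.Int.bitCount mask : Int) 2 ≠ 0 then G
  else
    let bits := (PySem.List.pyRange 0 (inc.length : Int) 1).map (fun i => PySem.Int.band (mask >>> i.toNat) 1)
    let gv := "v" ++ PySem.Int.toStr v ++ ":P" ++ PySem.Str.join "" (bits.map PySem.Int.toStr)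
    (PySem.List.enumerate inc).foldl (fun G p =>
      pvAddEdge G gv (p.2 ++ ":L" ++ PySem.Int.toStr (PySem.List.pyGetD bits p.1 0)))
      (pvTouch G gv)

def pvA2x (base : List (Int × Int)) : pvGraph → Int → pvGraph := fun G v =>
  let inc := (pvIncidentEdges base v).map pvEdgeName
  (PySem.List.pyRange 0 ((1 : Int) <<< inc.length) 1).foldl (pvA2mask inc v) G

def pvA3x0 (twisted : PySem.Set (Int × Int)) : pvGraph → (Int × Int) → pvGraph := fun G e =>
  let en := pvEdgeName e
  if twisted.contains e then
    pvAddEdge (pvAddEdge G (en ++ ":L0") (en ++ ":R0")) (en ++ ":L1") (en ++ ":R1")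
  else
    pvAddEdge (pvAddEdge G (en ++ ":L0") (en ++ ":R0")) (en ++ ":L1") (en ++ ":R1")

def pvA3x1 (twisted : PySem.Set (Int × Int)) : pvGraph → (Int × Int) → pvGraph := fun G e =>
  let en := pvEdgeName e
  if twisted.contains e then
    pvAddEdge (pvAddEdge G (en ++ ":L0") (en ++ ":R1")) (en ++ ":L1") (en ++ ":R0")
  else
    pvAddEdge (pvAddEdge G (en ++ ":L0") (en ++ ":R0")) (en ++ ":L1") (en ++ ":R1")

def pvB3x0 : pvGraph → (Int × Int) → pvGraph := fun G e =>
  let en := pvFmt e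
  pvLink (pvLink G (en ++ ":L" ++ PySem.Int.toStr 0) (en ++ ":R" ++ PySem.Int.toStr 0))
    (en ++ ":L" ++ PySem.Int.toStr 1) (en ++ ":R" ++ PySem.Int.toStr 1)

def pvB3x1 (twisted : PySem.Set (Int × Int)) : pvGraph → (Int × Int) → pvGraph := fun G e =>
  let en := pvFmt e
  let r : Int := if twisted.contains e then 1 else 0
  pvLink (pvLink G (en ++ ":L" ++ PySem.Int.toStr 0)
      (en ++ ":R" ++ PySem.Int.toStr (PySem.Int.mod (0 + r) 2)))
    (en ++ ":L" ++ PySem.Int.toStr 1) (en ++ ":R" ++ PySem.Int.toStr (PySem.Int.mod (1 + r) 2))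

-- pair steps split into their components --------------------------------------

theorem pvA1step_split (x y : pvGraph) (e : Int × Int) :
    pvA1step (x, y) e = (pvA1x x e, pvA1x y e) := rfl

theorem pvA2step_split (base : List (Int × Int)) (x y : pvGraph) (v : Int) :
    pvA2step base (x, y) v = (pvA2x base x v, pvA2x base y v) := by
  simp only [pvA2step, pvA2x]
  refine pvFoldlPair _ (pvA2mask ((pvIncidentEdges base v).map pvEdgeName) v)
    (pvA2mask ((pvIncidentEdges base v).map pvEdgeName) v) ?_ _ _ _
  intro a b mask
  by_cases hc : PySem.Int.mod (PySem.Int.bitCount mask : Int) 2 ≠ 0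
  · simp only [pvA2mask, if_pos hc]
  · simp only [pvA2mask, if_neg hc]
    exact pvFoldlPair _ _ _ (fun _ _ _ => rfl) _ _ _

theorem pvA3step_split (tw : PySem.Set (Int × Int)) (x y : pvGraph) (e : Int × Int) :
    pvA3step tw (x, y) e = (pvA3x0 tw x e, pvA3x1 tw y e) := by
  simp only [pvA3step, pvA3x0, pvA3x1]
  split_ifs <;> rfl

theorem pvP3step_split (tw : PySem.Set (Int × Int)) (x y : pvGraph) (e : Int × Int) :
    pvP3step tw (x, y) e = (pvB3x0 x e, pvB3x1 tw y e) := rfl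

-- phase 2: A's mask enumeration over a degree-1 / degree-2 incidence list
-- computes B's hard-coded gadgets ----------------------------------------------

set_option maxHeartbeats 1000000 in
theorem pvA2mask_fold_one (x : String) (v : Int) (G : pvGraph) :
    (PySem.List.pyRange 0 ((1 : Int) <<< ([x].length)) 1).foldl (pvA2mask [x] v) G
      = pvLink (pvTouch G ("v" ++ PySem.Int.toStr v ++ ":P0"))
          ("v" ++ PySem.Int.toStr v ++ ":P0") (x ++ ":L0") := by
  simp only [List.length_cons, List.length_nil, Nat.zero_add]
  rw [show PySem.List.pyRange 0 ((1:Int) <<< (1:Nat)) 1 = [0,1] from by decide]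
  simp [pvA2mask, PySem.List.enumerate, pvTouch, pvLink, pvAddEdge,
      show ((PySem.Int.bitCount (1:Int) : Int) % 2 = 1) from by decide,
      show ¬((PySem.Int.bitCount (0:Int) : Int) % 2 = 1) from by decide,
      show ((PySem.Int.bitCount (2:Int) : Int) % 2 = 1) from by decide,
      show ¬((PySem.Int.bitCount (3:Int) : Int) % 2 = 1) from by decide,
      show PySem.Int.band 0 1 = 0 from by decide, show PySem.Int.band 1 1 = 1 from by decide,
      show PySem.Int.toStr 0 = "0" from by decide, show PySem.Int.toStr 1 = "1" from by decide,
      show PySem.Str.join "" ["0"] = "0" from by decide,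
      show PySem.Str.join "" ["0", "0"] = "00" from by decide,
      show PySem.Str.join "" ["1", "1"] = "11" from by decide,
      String.append_assoc,
      show (":P" ++ "0" : String) = ":P0" from by decide,
      show (":P" ++ "00" : String) = ":P00" from by decide,
      show (":P" ++ "11" : String) = ":P11" from by decide,
      show (":L" ++ "0" : String) = ":L0" from by decide,
      show (":L" ++ "1" : String) = ":L1" from by decide,
      show PySem.List.pyGetD [(0:Int)] 0 0 = 0 from by decide,
      show PySem.List.pyGetD [(0:Int), 0] 0 0 = 0 from by decide,
      show PySem.List.pyGetD [(0:Int), 0] 1 0 = 0 from by decide,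
      show PySem.List.pyGetD [(1:Int), 1] 0 0 = 1 from by decide,
      show PySem.List.pyGetD [(1:Int), 1] 1 0 = 1 from by decide,
      show (PySem.List.pyRange 0 2 1).map (fun i => PySem.Int.band ((3:Int) >>> i.toNat) 1) = [1, 1] from by decide,
      show (PySem.List.pyRange 0 1 1).map (fun i => PySem.Int.band ((1:Int) >>> i.toNat) 1) = [1] from by decide,
      show PySem.Str.join "" ((PySem.List.pyRange 0 2 1).map (PySem.Int.toStr ∘ fun i => PySem.Int.band ((3:Int) >>> max i 0) 1)) = "11" from by decide,
      show PySem.List.pyGetD ((PySem.List.pyRange 0 2 1).map (fun i => PySem.Int.band ((3:Int) >>> max i 0) 1)) 0 0 = 1 from by decide,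
      show PySem.List.pyGetD ((PySem.List.pyRange 0 2 1).map (fun i => PySem.Int.band ((3:Int) >>> max i 0) 1)) 1 0 = 1 from by decide]

set_option maxHeartbeats 1000000 in
theorem pvA2mask_fold_two (x y : String) (v : Int) (G : pvGraph) :
    (PySem.List.pyRange 0 ((1 : Int) <<< ([x, y].length)) 1).foldl (pvA2mask [x, y] v) G
      = pvLink (pvLink (pvTouch
          (pvLink (pvLink (pvTouch G ("v" ++ PySem.Int.toStr v ++ ":P00"))
            ("v" ++ PySem.Int.toStr v ++ ":P00") (x ++ ":L0"))
            ("v" ++ PySem.Int.toStr v ++ ":P00") (y ++ ":L0"))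
          ("v" ++ PySem.Int.toStr v ++ ":P11"))
          ("v" ++ PySem.Int.toStr v ++ ":P11") (x ++ ":L1"))
          ("v" ++ PySem.Int.toStr v ++ ":P11") (y ++ ":L1") := by
  simp only [List.length_cons, List.length_nil, Nat.zero_add]
  rw [show PySem.List.pyRange 0 ((1:Int) <<< (2:Nat)) 1 = [0,1,2,3] from by decide]
  simp [pvA2mask, PySem.List.enumerate, pvTouch, pvLink, pvAddEdge,
      show ((PySem.Int.bitCount (1:Int) : Int) % 2 = 1) from by decide,
      show ¬((PySem.Int.bitCount (0:Int) : Int) % 2 = 1) from by decide,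
      show ((PySem.Int.bitCount (2:Int) : Int) % 2 = 1) from by decide,
      show ¬((PySem.Int.bitCount (3:Int) : Int) % 2 = 1) from by decide,
      show PySem.Int.band 0 1 = 0 from by decide, show PySem.Int.band 1 1 = 1 from by decide,
      show PySem.Int.toStr 0 = "0" from by decide, show PySem.Int.toStr 1 = "1" from by decide,
      show PySem.Str.join "" ["0"] = "0" from by decide,
      show PySem.Str.join "" ["0", "0"] = "00" from by decide,
      show PySem.Str.join "" ["1", "1"] = "11" from by decide,
      String.append_assoc,
      show (":P" ++ "0" : String) = ":P0" from by decide,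
      show (":P" ++ "00" : String) = ":P00" from by decide,
      show (":P" ++ "11" : String) = ":P11" from by decide,
      show (":L" ++ "0" : String) = ":L0" from by decide,
      show (":L" ++ "1" : String) = ":L1" from by decide,
      show PySem.List.pyGetD [(0:Int)] 0 0 = 0 from by decide,
      show PySem.List.pyGetD [(0:Int), 0] 0 0 = 0 from by decide,
      show PySem.List.pyGetD [(0:Int), 0] 1 0 = 0 from by decide,
      show PySem.List.pyGetD [(1:Int), 1] 0 0 = 1 from by decide,
      show PySem.List.pyGetD [(1:Int), 1] 1 0 = 1 from by decide,
      show (PySem.List.pyRange 0 2 1).map (fun i => PySem.Int.band ((3:Int) >>> i.toNat) 1) = [1, 1] from by decide,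
      show (PySem.List.pyRange 0 1 1).map (fun i => PySem.Int.band ((1:Int) >>> i.toNat) 1) = [1] from by decide,
      show PySem.Str.join "" ((PySem.List.pyRange 0 2 1).map (PySem.Int.toStr ∘ fun i => PySem.Int.band ((3:Int) >>> max i 0) 1)) = "11" from by decide,
      show PySem.List.pyGetD ((PySem.List.pyRange 0 2 1).map (fun i => PySem.Int.band ((3:Int) >>> max i 0) 1)) 0 0 = 1 from by decide,
      show PySem.List.pyGetD ((PySem.List.pyRange 0 2 1).map (fun i => PySem.Int.band ((3:Int) >>> max i 0) 1)) 1 0 = 1 from by decide]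

-- B's closed-form incidence strings are A's edge names of the incident edges
theorem pvIncNames (n v : Int) (hv0 : 0 ≤ v) (hvn : v < n) :
    (pvIncidentEdges (pvBaseB n) v).map pvEdgeName
      = (if n = 1 then ["e0_0"]
         else if v = 0 then ["e0_1", "e0_" ++ PySem.Int.toStr (n - 1)]
         else if v < n - 1 then
           ["e" ++ PySem.Int.toStr (v - 1) ++ "_" ++ PySem.Int.toStr v,
            "e" ++ PySem.Int.toStr v ++ "_" ++ PySem.Int.toStr (v + 1)]
         else
           ["e" ++ PySem.Int.toStr (n - 2) ++ "_" ++ PySem.Int.toStr (n - 1),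
            "e0_" ++ PySem.Int.toStr (n - 1)]) := by
  rw [pvInc_closed n v hv0 hvn]
  unfold pvIncPairs
  have hpre : ∀ t : String, ("e" ++ PySem.Int.toStr 0 ++ "_") ++ t = "e0_" ++ t := by
    intro t
    rw [show ("e" ++ PySem.Int.toStr 0 ++ "_") = "e0_" from by decide]
  split_ifs with h1 h2 h3
  · decide
  · subst h2
    simp only [List.map_cons, List.map_nil]
    rw [show pvEdgeName (0, 1) = "e0_1" from by decide]
    rw [show pvEdgeName (0, n - 1) = "e" ++ PySem.Int.toStr 0 ++ "_" ++ PySem.Int.toStr (n - 1) from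
      pvName_eq (0, n - 1) (by dsimp only; omega)]
    rw [hpre]
  · simp only [List.map_cons, List.map_nil]
    rw [pvName_eq (v - 1, v) (by dsimp only; omega), pvName_eq (v, v + 1) (by dsimp only; omega)]
    rfl
  · simp only [List.map_cons, List.map_nil]
    rw [pvName_eq (n - 2, n - 1) (by dsimp only; omega), pvName_eq (0, n - 1) (by dsimp only; omega)]
    rw [show pvFmt (0, n - 1) = "e" ++ PySem.Int.toStr 0 ++ "_" ++ PySem.Int.toStr (n - 1) from rfl]
    rw [hpre]
    rfl

theorem pvPhase2_eq (n : Int) (G : pvGraph) (v : Int) (hv0 : 0 ≤ v) (hvn : v < n) :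
    pvA2x (pvBaseB n) G v = pvQ2step n G v := by
  simp only [pvA2x, pvQ2step]
  rw [pvIncNames n v hv0 hvn]
  by_cases h1 : n = 1
  · simp only [if_pos h1]
    rw [pvA2mask_fold_one]
    simp [PySem.List.pyGetD, pvTouch]
  · simp only [if_neg h1]
    by_cases h2 : v = 0
    · simp only [if_pos h2]
      rw [pvA2mask_fold_two]
      simp [List.foldl_cons, List.foldl_nil, pvTouch,
        show PySem.Int.toStr 0 = "0" from by decide, show PySem.Int.toStr 1 = "1" from by decide,
        String.append_assoc,
        show (":L" ++ "0" : String) = ":L0" from by decide,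
        show (":L" ++ "1" : String) = ":L1" from by decide]
    · simp only [if_neg h2]
      by_cases h3 : v < n - 1
      · simp only [if_pos h3]
        rw [pvA2mask_fold_two]
        simp [List.foldl_cons, List.foldl_nil, pvTouch,
          show PySem.Int.toStr 0 = "0" from by decide, show PySem.Int.toStr 1 = "1" from by decide,
          String.append_assoc,
              show (":L" ++ "0" : String) = ":L0" from by decide,
          show (":L" ++ "1" : String) = ":L1" from by decide]
      · simp only [if_neg h3]
        rw [pvA2mask_fold_two]
        simp [List.foldl_cons, List.foldl_nil, pvTouch,
          show PySem.Int.toStr 0 = "0" from by decide, show PySem.Int.toStr 1 = "1" from by decide,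
          String.append_assoc,
              show (":L" ++ "0" : String) = ":L0" from by decide,
          show (":L" ++ "1" : String) = ":L1" from by decide]

-- phase 1 and phase 3 agreement -----------------------------------------------

theorem pvPhase1_eq (base : List (Int × Int)) (hord : ∀ e ∈ base, e.1 ≤ e.2) :
    base.foldl pvA1x PySem.Dict.empty = pvP1 base := by
  unfold pvP1
  apply PySem.List.foldl_congr_mem
  intro G e he
  simp only [pvA1x, pvP1step, List.foldl_cons, List.foldl_nil]
  rw [pvName_eq e (hord e he), pvCatL0, pvCatR0, pvCatL1, pvCatR1]
  rfl

theorem pvPhase3a_eq (tw : PySem.Set (Int × Int)) (G : pvGraph) (e : Int × Int)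
    (he : e.1 ≤ e.2) : pvA3x0 tw G e = pvB3x0 G e := by
  simp only [pvA3x0, pvB3x0, ite_self]
  rw [pvName_eq e he, pvCatL0, pvCatR0, pvCatL1, pvCatR1]
  rfl

theorem pvPhase3b_eq (tw : PySem.Set (Int × Int)) (G : pvGraph) (e : Int × Int)
    (he : e.1 ≤ e.2) : pvA3x1 tw G e = pvB3x1 tw G e := by
  simp only [pvA3x1, pvB3x1]
  by_cases hc : tw.contains e = true
  · rw [if_pos hc, if_pos hc,
      show PySem.Int.mod (0 + 1) 2 = 1 from by decide,
      show PySem.Int.mod (1 + 1) 2 = 0 from by decide,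
      pvName_eq e he, pvCatL0, pvCatR1, pvCatL1, pvCatR0]
    rfl
  · rw [if_neg hc, if_neg hc,
      show PySem.Int.mod (0 + 0) 2 = 0 from by decide,
      show PySem.Int.mod (1 + 0) 2 = 1 from by decide,
      pvName_eq e he, pvCatL0, pvCatR0, pvCatL1, pvCatR1]
    rfl

set_option maxHeartbeats 2000000 in
theorem pvGood_Q2P1 (base : List (Int × Int)) (n : Int) : pvGood (pvQ2 n (pvP1 base)) := by
  have h0 : pvGood (PySem.Dict.empty : pvGraph) := by
    constructor
    · simp [PySem.Dict.empty, PySem.Dict.keys]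
    · intro p hp
      simp [PySem.Dict.empty] at hp
  have hp1 : ∀ (G : pvGraph) (e : Int × Int), pvGood G → pvGood (pvP1step G e) := by
    intro G e h
    simp only [pvP1step, List.foldl_cons, List.foldl_nil]
    exact pvGood_touch (pvGood_touch (pvGood_touch (pvGood_touch h _) _) _) _
  have hfold : ∀ (v : Int) (inc : List String) (G : pvGraph), pvGood G →
      pvGood (([0, 1] : List Int).foldl (fun G b =>
        inc.foldl (fun G en => pvLink G
            ("v" ++ PySem.Int.toStr v ++ ":P" ++ PySem.Int.toStr b ++ PySem.Int.toStr b)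
            (en ++ ":L" ++ PySem.Int.toStr b))
          (G.setdefault ("v" ++ PySem.Int.toStr v ++ ":P" ++ PySem.Int.toStr b ++ PySem.Int.toStr b)
            PySem.Set.empty)) G) := by
    intro v inc G h
    apply pvFoldlInv pvGood _ ?_ _ _ h
    intro d b hd
    apply pvFoldlInv pvGood _ ?_ _ _ (pvGood_touch hd _)
    intro d' en hd'
    exact pvGood_link hd' _ _
  have hgen : ∀ (v : Int) (inc : List String) (G : pvGraph), pvGood G →
      pvGood (if inc.length = 1 then
          pvLink (G.setdefault ("v" ++ PySem.Int.toStr v ++ ":P0") PySem.Set.empty)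
            ("v" ++ PySem.Int.toStr v ++ ":P0") (PySem.List.pyGetD inc 0 "" ++ ":L0")
        else
          ([0, 1] : List Int).foldl (fun G b =>
            inc.foldl (fun G en => pvLink G
                ("v" ++ PySem.Int.toStr v ++ ":P" ++ PySem.Int.toStr b ++ PySem.Int.toStr b)
                (en ++ ":L" ++ PySem.Int.toStr b))
              (G.setdefault
                ("v" ++ PySem.Int.toStr v ++ ":P" ++ PySem.Int.toStr b ++ PySem.Int.toStr b)
                PySem.Set.empty)) G) := by
    intro v inc G h
    split_ifs with hlen
    · exact pvGood_link (pvGood_touch h _) _ _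
    · exact hfold v inc G h
  have hp2 : ∀ (G : pvGraph) (v : Int), pvGood G → pvGood (pvQ2step n G v) := by
    intro G v h
    exact hgen v _ G h
  exact pvFoldlInv pvGood _ (fun d a hd => hp2 d a hd) _ _
    (pvFoldlInv pvGood _ (fun d a hd => hp1 d a hd) _ _ h0)

-- assembling ------------------------------------------------------------------

theorem pvAssembly_eq (n : Int) (tw : PySem.Set (Int × Int)) :
    pvAssemblyA n (pvBaseB n) tw = pvAssemblyB n (pvBaseB n) tw := by
  have hord := pvBase_ordered n
  simp only [pvAssemblyA, pvAssemblyB]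
  rw [pvFoldlPair pvA1step pvA1x pvA1x pvA1step_split, pvPhase1_eq (pvBaseB n) hord,
    pvFoldlPair (pvA2step (pvBaseB n)) (pvA2x (pvBaseB n)) (pvA2x (pvBaseB n))
      (pvA2step_split (pvBaseB n))]
  have h2 : (PySem.List.pyRange 0 n 1).foldl (pvA2x (pvBaseB n)) (pvP1 (pvBaseB n))
      = pvQ2 n (pvP1 (pvBaseB n)) := by
    unfold pvQ2
    apply PySem.List.foldl_congr_mem
    intro G v hv
    have hv' := PySem.List.mem_pyRange_one.mp hv
    exact pvPhase2_eq n G v hv'.1 hv'.2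
  rw [h2, pvCopyId (pvGood_Q2P1 (pvBaseB n) n)]
  rw [pvFoldlPair (pvA3step tw) (pvA3x0 tw) (pvA3x1 tw) (pvA3step_split tw),
    pvFoldlPair (pvP3step tw) pvB3x0 (pvB3x1 tw) (pvP3step_split tw)]
  rw [PySem.List.foldl_congr_mem (pvBaseB n) (pvA3x0 tw) pvB3x0 _
      (fun G e he => pvPhase3a_eq tw G e (hord e he)),
    PySem.List.foldl_congr_mem (pvBaseB n) (pvA3x1 tw) (pvB3x1 tw) _
      (fun G e he => pvPhase3b_eq tw G e (hord e he))]

-- ===== VERDICT (by name: the statement is the Claim_ definition above) =====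

theorem cfi_pair_on_cycle_spec : Claim_equal_cfi_pair_on_cycle := by
  intro n te _hdom
  unfold Spec_cfi_pair_on_cycle
  calc cfi_pair_on_cycle n te
      = pvAssemblyA n (pvABase n) (pvTw te) := pvAssemblyA_spec n te
    _ = pvAssemblyA n (pvBaseB n) (pvTw te) := by rw [pvABase_eq_baseB]
    _ = pvAssemblyB n (pvBaseB n) (pvTw te) := pvAssembly_eq n (pvTw te)
    _ = cfi_pair_on_cycle_alt n te := (pvAssemblyB_spec n te).symm
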